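-- pv_equiv track=rewrite | github.com/venkate5hgunda/google-foobar-questions | fuel-injection-perfection-method1-python2.py | convert_to_divisible_by_four
-- ===== SOURCE A (Python) =====
-- def convert_to_divisible_by_four(num): # convert into 4 divisible number by adding/subtracting a number
--     ans=""
--     if(len(num)<2):
--         ans+=chr((ord(num[0])-ord('0')-1)+ord('0') if (ord(num[0])-ord('0')-1)%4==0 else (ord(num[0])-ord('0')+1)+ord('0'))
--     else:
--         idx=len(num)-1
--         temp=(ord(num[idx-1])-ord('0'))*10+(ord(num[idx])-ord('0'))
--         if((temp+1)%4==0):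
--             ans=chr((int(((ord(num[idx])-ord('0'))+1)%10))+ord('0'))
--             carry=((ord(num[idx])-ord('0'))+1)//10
--             idx-=1
--             while(idx>=0 or carry!=0):
--                 if(idx<0):
--                     ans=(chr((int(carry%10))+ord('0')))+ans
--                     carry=0
--                 else:
--                     ans=(chr((int(((ord(num[idx])-ord('0'))+carry)%10))+ord('0')))+ans
--                     carry=((ord(num[idx])-ord('0'))+carry)//10
--                     idx-=1
--         else:
--             ans=chr((int(((ord(num[idx])-ord('0'))-1)%10))+ord('0'))
--             carry=((ord(num[idx])-ord('0'))-1)//10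
--             idx-=1
--             while(idx>=0 or carry!=0):
--                 if(idx<0):
--                     ans=(chr((int(carry%10))+ord('0')))+ans
--                     carry=0
--                 else:
--                     ans=(chr((int(((ord(num[idx])-ord('0'))+carry)%10))+ord('0')))+ans
--                     carry=((ord(num[idx])-ord('0'))+carry)//10
--                     idx-=1
--     return ans
-- ===== SOURCE B (Python) =====
-- def convert_to_divisible_by_four(num):
--     # evaluate the numeral once, adjust the whole number by +/-1, then render it
--     # fixed-width (len(num) digits, plus a single leading carry digit if one is left)
--     if len(num) < 2:
--         d = ord(num[0]) - ord('0')
--         return chr(ord('0') + (d - 1 if (d - 1) % 4 == 0 else d + 1))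
--     n = 0
--     for ch in num:
--         n = n * 10 + (ord(ch) - ord('0'))
--     m = n + 1 if (n + 1) % 4 == 0 else n - 1
--     digits = []
--     for _ in range(len(num)):
--         digits.append(chr(ord('0') + m % 10))
--         m //= 10
--     if m != 0:
--         digits.append(chr(ord('0') + m % 10))
--     return ''.join(reversed(digits))
-- ===== Notes on version B (the rewrite author's own statement) =====
-- stated objective: simpler
-- what changed: Replaces A's two duplicated per-digit carry/borrow loops that rewrite the string character by character with computing the numeral's integer value once, adjusting the whole number by +/-1, and rendering it back in a single fixed-width divmod loop.
import Mathlib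
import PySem

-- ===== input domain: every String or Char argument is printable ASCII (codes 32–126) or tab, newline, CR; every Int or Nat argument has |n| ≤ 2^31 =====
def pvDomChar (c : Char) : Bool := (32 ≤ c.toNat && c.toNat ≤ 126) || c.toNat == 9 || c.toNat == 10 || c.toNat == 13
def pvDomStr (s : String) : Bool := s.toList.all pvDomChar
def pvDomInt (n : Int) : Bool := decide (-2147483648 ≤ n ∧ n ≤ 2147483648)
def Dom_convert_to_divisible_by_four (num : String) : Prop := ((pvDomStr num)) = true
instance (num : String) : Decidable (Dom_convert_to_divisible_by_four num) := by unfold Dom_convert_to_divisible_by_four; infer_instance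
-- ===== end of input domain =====

-- B replaces A's per-digit carry/borrow string rewriting with: evaluate the numeral's integer
-- value once, adjust the whole number by +/-1, render it back in one fixed-width divmod loop
-- (objective: simpler).

-- ===== PORT A =====
-- ord(c) and chr(n) (exact for the 0 ≤ n < 0xD800 values these programs produce)
def pvOrd (c : Char) : Int := (c.toNat : Int)
def pvChr (n : Int) : Char := Char.ofNat n.toNat

-- the 'while(idx>=0 or carry!=0)' loop of A, with the loop variable idx represented as i - 1
-- (structural recursion on i = idx + 1; i = 0 is Python's idx < 0)
def pvLoopA (cs : List Char) (i : Nat) (carry : Int) (ans : List Char) : List Char :=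
  match i with
  | 0 => if carry ≠ 0 then pvChr (PySem.Int.mod carry 10 + 48) :: ans else ans
  | i' + 1 =>
    let d := pvOrd (PySem.List.pyGetD cs (i' : Int) '0') - 48
    pvLoopA cs i' (PySem.Int.floordiv (d + carry) 10)
      (pvChr (PySem.Int.mod (d + carry) 10 + 48) :: ans)

def convert_to_divisible_by_four (num : String) : String :=
  let cs := num.toList
  if cs.length < 2 then
    let d := pvOrd (PySem.List.pyGetD cs 0 '0') - 48
    String.mk [pvChr (if PySem.Int.mod (d - 1) 4 = 0 then (d - 1) + 48 else (d + 1) + 48)]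
  else
    let idx : Int := (cs.length : Int) - 1
    let temp := (pvOrd (PySem.List.pyGetD cs (idx - 1) '0') - 48) * 10
                + (pvOrd (PySem.List.pyGetD cs idx '0') - 48)
    let dl := pvOrd (PySem.List.pyGetD cs idx '0') - 48
    if PySem.Int.mod (temp + 1) 4 = 0 then
      String.mk (pvLoopA cs (cs.length - 1) (PySem.Int.floordiv (dl + 1) 10)
        [pvChr (PySem.Int.mod (dl + 1) 10 + 48)])
    else
      String.mk (pvLoopA cs (cs.length - 1) (PySem.Int.floordiv (dl - 1) 10)
        [pvChr (PySem.Int.mod (dl - 1) 10 + 48)])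

-- ===== PORT B =====
-- B's rendering loop: 'for _ in range(len(num)): digits.append(chr(48 + m % 10)); m //= 10'
def pvRenderLoop (m : Int) (k : Nat) (digits : List Char) : List Char × Int :=
  match k with
  | 0 => (digits, m)
  | k' + 1 =>
    pvRenderLoop (PySem.Int.floordiv m 10) k'
      (digits ++ [pvChr (48 + PySem.Int.mod m 10)])

def convert_to_divisible_by_four_alt (num : String) : String :=
  let cs := num.toList
  if cs.length < 2 then
    let d := pvOrd (PySem.List.pyGetD cs 0 '0') - 48
    String.mk [pvChr (48 + (if PySem.Int.mod (d - 1) 4 = 0 then d - 1 else d + 1))]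
  else
    let n := cs.foldl (fun a c => a * 10 + ((c.toNat : Int) - 48)) 0
    let m := if PySem.Int.mod (n + 1) 4 = 0 then n + 1 else n - 1
    let r := pvRenderLoop m cs.length []
    let digits := if r.2 ≠ 0 then r.1 ++ [pvChr (48 + PySem.Int.mod r.2 10)] else r.1
    String.mk digits.reverse

-- ===== PRECONDITION & SPEC =====
-- Pre_ excludes only the empty string, on which both Pythons raise IndexError (num[0]).
def Pre_convert_to_divisible_by_four (num : String) : Prop := num.toList ≠ []
instance (num : String) : Decidable (Pre_convert_to_divisible_by_four num) := by
  unfold Pre_convert_to_divisible_by_four; infer_instance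

def pvWitness_convert_to_divisible_by_four : String := "13"

def Spec_convert_to_divisible_by_four (num : String) (out : String) : Prop :=
  out = convert_to_divisible_by_four_alt num
instance (num : String) (out : String) : Decidable (Spec_convert_to_divisible_by_four num out) := by
  unfold Spec_convert_to_divisible_by_four; infer_instance

-- ===== CLAIM (what is proved, stated in full; the proofs are below) =====
def Claim_equal_convert_to_divisible_by_four : Prop :=
  ∀ (num : String), Dom_convert_to_divisible_by_four num →
    Pre_convert_to_divisible_by_four num →
    Spec_convert_to_divisible_by_four num (convert_to_divisible_by_four num)

-- ===== LEMMAS AND PROOFS =====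

-- digit-weighted value of a char list (what B's fold computes, for any chars)
def pvDv (c : Char) : Int := (c.toNat : Int) - 48
def pvVal (l : List Char) : Int := l.foldl (fun a c => a * 10 + ((c.toNat : Int) - 48)) 0

-- the common normal form of both programs' multi-digit output:
-- k low base-10 digits of m, most significant first, plus one leftover-carry digit
def pvF : Int → Nat → List Char
  | m, 0 => if m = 0 then [] else [pvChr (m % 10 + 48)]
  | m, k + 1 => pvF (m / 10) k ++ [pvChr (m % 10 + 48)]

lemma pvVal_append (l : List Char) (c : Char) :
    pvVal (l ++ [c]) = pvVal l * 10 + pvDv c := by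
  simp [pvVal, List.foldl_append, pvDv]

lemma pvVal_take_succ (cs : List Char) (k : Nat) (hk : k < cs.length) :
    pvVal (cs.take (k + 1)) = pvVal (cs.take k) * 10 + pvDv cs[k] := by
  rw [List.take_succ_eq_append_getElem hk]
  exact pvVal_append (cs.take k) cs[k]

-- A's loop computes pvF of (value of the processed prefix + carry)
lemma pvLoopA_spec (k : Nat) (cs : List Char) (carry : Int) (ans : List Char)
    (hk : k ≤ cs.length) :
    pvLoopA cs k carry ans = pvF (pvVal (cs.take k) + carry) k ++ ans := by
  induction k generalizing carry ans with
  | zero =>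
    rw [pvLoopA]
    simp only [List.take_zero, pvF]
    rw [PySem.Int.mod_eq_emod_of_pos (by norm_num)]
    have : pvVal [] = 0 := rfl
    rw [this, zero_add]
    split_ifs with h1 h2 <;> simp_all
  | succ k ih =>
    rw [pvLoopA]
    have hklt : k < cs.length := by omega
    have hget : PySem.List.pyGetD cs (k : Int) '0' = cs[k] := by
      rw [PySem.List.pyGetD_natCast, List.getD_eq_getElem _ _ hklt]
    simp only [hget]
    rw [ih _ _ (by omega)]
    rw [PySem.Int.mod_eq_emod_of_pos (by norm_num),
        PySem.Int.floordiv_eq_ediv_of_pos (by norm_num)]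
    have hdv : pvOrd cs[k] - 48 = pvDv cs[k] := rfl
    rw [hdv]
    rw [pvVal_take_succ cs k hklt]
    show _ = pvF ((pvVal (cs.take k) * 10 + pvDv cs[k]) + carry) (k+1) ++ ans
    rw [pvF]
    have h1 : (pvVal (cs.take k) * 10 + pvDv cs[k] + carry) / 10
        = pvVal (cs.take k) + (pvDv cs[k] + carry) / 10 := by omega
    have h2 : (pvVal (cs.take k) * 10 + pvDv cs[k] + carry) % 10
        = (pvDv cs[k] + carry) % 10 := by omega
    rw [h1, h2]
    simp

-- B's rendering loop (with its final leftover-carry digit) also computes pvF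
lemma pvRenderLoop_spec (k : Nat) : ∀ (m : Int) (ds : List Char),
    (if (pvRenderLoop m k ds).2 ≠ 0 then
        (pvRenderLoop m k ds).1 ++ [pvChr (48 + PySem.Int.mod (pvRenderLoop m k ds).2 10)]
      else (pvRenderLoop m k ds).1).reverse
    = pvF m k ++ ds.reverse := by
  induction k with
  | zero =>
    intro m ds
    rw [pvRenderLoop]
    simp only [pvF]
    rw [PySem.Int.mod_eq_emod_of_pos (by norm_num)]
    rw [show pvChr (48 + m % 10) = pvChr (m % 10 + 48) by rw [Int.add_comm]]
    split_ifs with h1 h2 <;> simp_all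
  | succ k ih =>
    intro m ds
    rw [pvRenderLoop]
    rw [ih]
    rw [PySem.Int.mod_eq_emod_of_pos (by norm_num),
        PySem.Int.floordiv_eq_ediv_of_pos (by norm_num)]
    rw [pvF]
    rw [show pvChr (48 + m % 10) = pvChr (m % 10 + 48) by rw [Int.add_comm]]
    simp

-- ===== VERDICT (by name: the statement is the Claim_ definition above) =====
theorem convert_to_divisible_by_four_spec : Claim_equal_convert_to_divisible_by_four := by
  intro num _hdom hne
  show convert_to_divisible_by_four num = convert_to_divisible_by_four_alt num
  by_cases hlen : num.toList.length < 2
  · -- single character: both build one chr from the same branch on the same digit value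
    simp only [convert_to_divisible_by_four, convert_to_divisible_by_four_alt]
    rw [if_pos hlen, if_pos hlen]
    simp only [show ∀ x : Int, (48 : Int) + x = x + 48 from fun x => Int.add_comm 48 x]
    split_ifs <;> rfl
  · -- two or more characters
    have hk1 : num.toList.length - 1 < num.toList.length := by omega
    have hk2 : num.toList.length - 2 < num.toList.length := by omega
    have hget1 : PySem.List.pyGetD num.toList ((num.toList.length : Int) - 1) '0'
        = num.toList[num.toList.length - 1] := by
      rw [show ((num.toList.length : Int) - 1) = ((num.toList.length - 1 : Nat) : Int) by omega,
        PySem.List.pyGetD_natCast, List.getD_eq_getElem _ _ hk1]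
    have hget2 : PySem.List.pyGetD num.toList ((num.toList.length : Int) - 1 - 1) '0'
        = num.toList[num.toList.length - 2] := by
      rw [show ((num.toList.length : Int) - 1 - 1) = ((num.toList.length - 2 : Nat) : Int) by omega,
        PySem.List.pyGetD_natCast, List.getD_eq_getElem _ _ hk2]
    have e1 : pvVal num.toList
        = pvVal (num.toList.take (num.toList.length - 1)) * 10
          + pvDv num.toList[num.toList.length - 1] := by
      have h := pvVal_take_succ num.toList (num.toList.length - 1) hk1
      rw [show num.toList.length - 1 + 1 = num.toList.length by omega, List.take_length] at h
      exact h
    have e2 : pvVal (num.toList.take (num.toList.length - 1))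
        = pvVal (num.toList.take (num.toList.length - 2)) * 10
          + pvDv num.toList[num.toList.length - 2] := by
      have h := pvVal_take_succ num.toList (num.toList.length - 2) hk2
      rw [show num.toList.length - 2 + 1 = num.toList.length - 1 by omega] at h
      exact h
    -- A's loop output equals pvF (value ± 1), in each branch
    have hAside : ∀ d10 : Int,
        pvLoopA num.toList (num.toList.length - 1)
          (PySem.Int.floordiv (pvDv num.toList[num.toList.length - 1] + d10) 10)
          [pvChr (PySem.Int.mod (pvDv num.toList[num.toList.length - 1] + d10) 10 + 48)]
          = pvF (pvVal num.toList + d10) num.toList.length := by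
      intro d10
      rw [pvLoopA_spec (num.toList.length - 1) num.toList _ _ (by omega)]
      rw [PySem.Int.mod_eq_emod_of_pos (show (0:Int) < 10 by norm_num),
        PySem.Int.floordiv_eq_ediv_of_pos (show (0:Int) < 10 by norm_num)]
      set dl := pvDv num.toList[num.toList.length - 1] with hdl
      set V := pvVal (num.toList.take (num.toList.length - 1)) with hV
      rw [e1]
      conv_rhs => rw [show num.toList.length = (num.toList.length - 1) + 1 from by omega]
      rw [pvF]
      congr 1
      · congr 1
        omega
      · congr 2
        omega
    -- B's rendering of m equals pvF m
    have hBside : ∀ m : Int,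
        (if (pvRenderLoop m num.toList.length []).2 ≠ 0 then
            (pvRenderLoop m num.toList.length []).1
              ++ [pvChr (48 + PySem.Int.mod (pvRenderLoop m num.toList.length []).2 10)]
          else (pvRenderLoop m num.toList.length []).1).reverse
        = pvF m num.toList.length := by
      intro m
      rw [pvRenderLoop_spec]
      simp
    simp only [convert_to_divisible_by_four, convert_to_divisible_by_four_alt]
    rw [if_neg hlen, if_neg hlen]
    rw [hget1, hget2]
    have hfold : num.toList.foldl (fun a c => a * 10 + ((c.toNat : Int) - 48)) 0
        = pvVal num.toList := rfl
    rw [hfold]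
    simp only [show ∀ c : Char, pvOrd c - 48 = pvDv c from fun _ => rfl]
    have hcond : (PySem.Int.mod ((pvDv num.toList[num.toList.length - 2] * 10
          + pvDv num.toList[num.toList.length - 1]) + 1) 4 = 0)
        ↔ (PySem.Int.mod (pvVal num.toList + 1) 4 = 0) := by
      rw [PySem.Int.mod_eq_emod_of_pos (show (0:Int) < 4 by norm_num),
        PySem.Int.mod_eq_emod_of_pos (show (0:Int) < 4 by norm_num)]
      omega
    by_cases hc4 : PySem.Int.mod (pvVal num.toList + 1) 4 = 0
    · rw [if_pos (hcond.2 hc4), if_pos hc4]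
      rw [hAside 1, hBside (pvVal num.toList + 1)]
    · rw [if_neg (fun h => hc4 (hcond.1 h)), if_neg hc4]
      rw [show pvDv num.toList[num.toList.length - 1] - 1
          = pvDv num.toList[num.toList.length - 1] + (-1) by ring]
      rw [hAside (-1), hBside (pvVal num.toList - 1)]
      rw [show pvVal num.toList + (-1) = pvVal num.toList - 1 by ring]
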